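-- pv_equiv track=rewrite | github.com/Jeferson681/infra-monitoring-system | src/monitoring/averages.py | _build_used_files_lines
-- ===== SOURCE A (Python) =====
-- from typing import Iterator, Optional, Dict, Any, List
--
-- def _build_used_files_lines(window: List[tuple]) -> Dict[str, tuple[int, int]]:
--     used_files: Dict[str, tuple[int, int]] = {}
--     for _o, _ts, p, ln in window:
--         k = str(p)
--         if k in used_files:
--             cur_min, cur_max = used_files[k]
--             if ln < cur_min:
--                 cur_min = ln
--             if ln > cur_max:
--                 cur_max = ln
--             used_files[k] = (cur_min, cur_max)
--         else:
--             used_files[k] = (ln, ln)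
--     return used_files
-- ===== SOURCE B (Python) =====
-- from typing import Dict, List
--
-- def _build_used_files_lines(window: List[tuple]) -> Dict[str, tuple[int, int]]:
--     # Two-pass: collect all line numbers per key, then reduce each group with min/max.
--     groups: Dict[str, List[int]] = {}
--     for _o, _ts, p, ln in window:
--         k = str(p)
--         groups[k] = groups.get(k, []) + [ln]
--     return {k: (min(v), max(v)) for k, v in groups.items()}
-- ===== Notes on version B (the rewrite author's own statement) =====
-- stated objective: alternative
-- what changed: B replaces A's single pass with a running (min,max) per key by a two-pass collect-then-reduce: it first groups every line number under its key, then builds the result with min/max over each group.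
import Mathlib
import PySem

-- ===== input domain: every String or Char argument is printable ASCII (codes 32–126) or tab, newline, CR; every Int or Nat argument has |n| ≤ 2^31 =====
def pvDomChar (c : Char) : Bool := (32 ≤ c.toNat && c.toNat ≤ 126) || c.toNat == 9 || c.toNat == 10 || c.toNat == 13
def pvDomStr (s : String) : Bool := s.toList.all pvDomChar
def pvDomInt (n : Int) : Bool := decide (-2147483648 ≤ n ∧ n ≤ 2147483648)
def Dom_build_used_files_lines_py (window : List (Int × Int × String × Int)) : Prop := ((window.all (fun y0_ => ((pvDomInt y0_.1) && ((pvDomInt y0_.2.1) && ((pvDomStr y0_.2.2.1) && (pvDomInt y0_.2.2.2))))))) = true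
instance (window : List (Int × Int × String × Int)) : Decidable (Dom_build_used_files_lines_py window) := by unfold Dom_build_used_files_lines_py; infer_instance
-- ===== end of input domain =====

-- B keeps the same result but by a two-pass collect-then-reduce decomposition (group all
-- line numbers per key, then take min/max of each group) instead of A's running min/max.

-- ===== PORT A =====
-- one loop step of A: look the key up, update the running (min, max) or start it at (ln, ln)
def pvStepA (d : PySem.Dict String (Int × Int)) (y : Int × Int × String × Int) :
    PySem.Dict String (Int × Int) :=
  let k := y.2.2.1          -- str(p) on a str is p itself
  let ln := y.2.2.2
  match d.get? k with
  | some (cur_min, cur_max) =>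
      let cur_min := if ln < cur_min then ln else cur_min
      let cur_max := if cur_max < ln then ln else cur_max   -- ln > cur_max
      d.insert k (cur_min, cur_max)
  | none => d.insert k (ln, ln)

def build_used_files_lines_py (window : List (Int × Int × String × Int)) :
    List (String × Int × Int) :=
  (window.foldl pvStepA PySem.Dict.empty).items

-- ===== PORT B =====
def build_used_files_lines_py_alt (window : List (Int × Int × String × Int)) :
    List (String × Int × Int) :=
  -- pass 1: groups[k] = groups.get(k, []) + [ln]
  let groups := window.foldl
    (fun d y => d.modify y.2.2.1 [] (fun v => v ++ [y.2.2.2])) PySem.Dict.empty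
  -- pass 2: {k: (min(v), max(v)) for k, v in groups.items()}; every v is nonempty, so the
  -- .getD 0 defaults (min/max raise on [] in Python, i.e. none here) are never used
  groups.items.map (fun p =>
    (p.1, (PySem.List.min? p.2 id).getD 0, (PySem.List.max? p.2 id).getD 0))

-- ===== PRECONDITION & SPEC =====
def Spec_build_used_files_lines_py (window : List (Int × Int × String × Int)) (out : List (String × Int × Int)) : Prop := out = build_used_files_lines_py_alt window
instance (window : List (Int × Int × String × Int)) (out : List (String × Int × Int)) : Decidable (Spec_build_used_files_lines_py window out) := by unfold Spec_build_used_files_lines_py; infer_instance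

-- ===== CLAIM (what is proved, stated in full; the proofs are below) =====
def Claim_equal_build_used_files_lines_py : Prop := ∀ (window : List (Int × Int × String × Int)), Dom_build_used_files_lines_py window → Spec_build_used_files_lines_py window (build_used_files_lines_py window)

-- ===== LEMMAS AND PROOFS =====

-- the value A's step inserts at the key of y
def pvValA (d : PySem.Dict String (Int × Int)) (y : Int × Int × String × Int) : Int × Int :=
  match d.get? y.2.2.1 with
  | some (a, b) => ((if y.2.2.2 < a then y.2.2.2 else a), (if b < y.2.2.2 then y.2.2.2 else b))
  | none => (y.2.2.2, y.2.2.2)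

theorem pvStepA_eq : pvStepA = fun d y => d.insert y.2.2.1 (pvValA d y) := by
  funext d y
  unfold pvStepA pvValA
  cases h : d.get? y.2.2.1 with
  | none => simp [h]
  | some p => cases p; simp [h]

-- combining one line number into an optional running (min, max)
def pvMM (o : Option (Int × Int)) (x : Int) : Option (Int × Int) :=
  match o with
  | none => some (x, x)
  | some (a, b) => some ((if x < a then x else a), (if b < x then x else b))

theorem get?_pvStepA (d : PySem.Dict String (Int × Int)) (y : Int × Int × String × Int)
    (k : String) :
    (pvStepA d y).get? k = if y.2.2.1 = k then pvMM (d.get? k) y.2.2.2 else d.get? k := by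
  rw [pvStepA_eq]
  by_cases h : y.2.2.1 = k
  · subst h
    rw [PySem.Dict.get?_insert_self]
    unfold pvValA pvMM
    cases hd : d.get? y.2.2.1 with
    | none => simp
    | some p => cases p; simp
  · rw [PySem.Dict.get?_insert_of_ne _ _ (fun hk => h hk.symm)]
    simp [h]

-- A's fold, looked up at k, is pvMM folded over the line numbers filed under k
theorem lemA (l : List (Int × Int × String × Int)) (d : PySem.Dict String (Int × Int))
    (k : String) :
    (l.foldl pvStepA d).get? k =
      ((l.filter (fun y => y.2.2.1 == k)).map (fun y => y.2.2.2)).foldl pvMM (d.get? k) := by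
  induction l generalizing d with
  | nil => rfl
  | cons y l ih =>
      simp only [List.foldl_cons, List.filter_cons]
      by_cases h : y.2.2.1 = k
      · simp only [h, beq_self_eq_true, if_pos, List.map_cons, List.foldl_cons]
        rw [ih, get?_pvStepA, if_pos h]
      · have : (y.2.2.1 == k) = false := beq_eq_false_iff_ne.mpr h
        simp only [this, Bool.false_eq_true, if_neg, not_false_iff]
        rw [ih, get?_pvStepA, if_neg h]

-- folding pvMM from a definite (a, b) is the pair of the min-fold and the max-fold
theorem pvMM_foldl_some (v : List Int) (a b : Int) :
    v.foldl pvMM (some (a, b)) =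
      some (v.foldl (fun m x => if x < m then x else m) a,
            v.foldl (fun m x => if m < x then x else m) b) := by
  induction v generalizing a b with
  | nil => rfl
  | cons x v ih => simp only [List.foldl_cons, pvMM]; exact ih _ _

theorem min?_foldl_some (v : List Int) (m : Int) :
    v.foldl (fun acc x => match acc with
      | none => some x
      | some m => if (x : Int) < m then some x else some m) (some m) =
      some (v.foldl (fun m x => if x < m then x else m) m) := by
  induction v generalizing m with
  | nil => rfl
  | cons x v ih =>
      simp only [List.foldl_cons]
      by_cases h : x < m <;> simp [h, ih]

theorem max?_foldl_some (v : List Int) (m : Int) :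
    v.foldl (fun acc x => match acc with
      | none => some x
      | some m => if (m : Int) < x then some x else some m) (some m) =
      some (v.foldl (fun m x => if m < x then x else m) m) := by
  induction v generalizing m with
  | nil => rfl
  | cons x v ih =>
      simp only [List.foldl_cons]
      by_cases h : m < x <;> simp [h, ih]

-- on a nonempty group, the pvMM fold is exactly (min(v), max(v))
theorem pvMM_min_max (v : List Int) (hv : v ≠ []) :
    v.foldl pvMM none =
      some ((PySem.List.min? v id).getD 0, (PySem.List.max? v id).getD 0) := by
  cases v with
  | nil => exact absurd rfl hv
  | cons x v =>
      have hmin : PySem.List.min? (x :: v) id = v.foldl (fun acc x => match acc with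
          | none => some x
          | some m => if (x : Int) < m then some x else some m) (some x) := by
        simp only [PySem.List.min?, List.foldl_cons]
        congr 1
        funext acc y
        cases acc <;> rfl
      have hmax : PySem.List.max? (x :: v) id = v.foldl (fun acc x => match acc with
          | none => some x
          | some m => if (m : Int) < x then some x else some m) (some x) := by
        simp only [PySem.List.max?, List.foldl_cons]
        congr 1
        funext acc y
        cases acc <;> rfl
      simp only [List.foldl_cons]
      rw [show pvMM none x = some (x, x) from rfl, pvMM_foldl_some, hmin, hmax,
        min?_foldl_some, max?_foldl_some]
      rfl

-- B's group at key k is the line numbers of the window entries filed under k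
theorem lemB (window : List (Int × Int × String × Int)) (k : String) :
    (window.foldl (fun d y => d.modify y.2.2.1 [] (fun v => v ++ [y.2.2.2]))
        (PySem.Dict.empty : PySem.Dict String (List Int))).getD k [] =
      (window.filter (fun y => y.2.2.1 == k)).map (fun y => y.2.2.2) := by
  have h := PySem.Dict.getD_foldl_modify_append
    (window.map (fun y => (y.2.2.1, y.2.2.2)))
    (PySem.Dict.empty : PySem.Dict String (List Int)) k
  rw [List.foldl_map] at h
  simpa [List.filter_map, Function.comp] using h

-- ===== VERDICT (by name: the statement is the Claim_ definition above) =====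
theorem build_used_files_lines_py_spec : Claim_equal_build_used_files_lines_py := by
  intro window _
  show build_used_files_lines_py window = build_used_files_lines_py_alt window
  unfold build_used_files_lines_py build_used_files_lines_py_alt
  simp only []
  set dA := window.foldl pvStepA PySem.Dict.empty with hdA
  set dB := window.foldl (fun d y => d.modify y.2.2.1 [] (fun v => v ++ [y.2.2.2]))
      (PySem.Dict.empty : PySem.Dict String (List Int)) with hdB
  have hndA : dA.keys.Nodup := by
    rw [hdA, pvStepA_eq]
    exact PySem.Dict.nodup_keys_foldl_insert_key window (fun y => y.2.2.1) pvValA _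
      (by simp [PySem.Dict.keys_empty])
  have hndB : dB.keys.Nodup := by
    rw [hdB]
    exact PySem.Dict.nodup_keys_foldl_modify_key window (fun y => y.2.2.1) []
      (fun _ y v => v ++ [y.2.2.2]) _ (by simp [PySem.Dict.keys_empty])
  have hkA : dA.keys = PySem.Set.update [] (window.map (fun y => y.2.2.1)) := by
    rw [hdA, pvStepA_eq,
      PySem.Dict.keys_foldl_insert_key window (fun y => y.2.2.1) pvValA _,
      PySem.Dict.keys_empty]
  have hkB : dB.keys = PySem.Set.update [] (window.map (fun y => y.2.2.1)) := by
    rw [hdB,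
      PySem.Dict.keys_foldl_modify_key window (fun y => y.2.2.1) []
        (fun _ y v => v ++ [y.2.2.2]) _,
      PySem.Dict.keys_empty]
  show dA.items = dB.items.map
    (fun p => (p.1, (PySem.List.min? p.2 id).getD 0, (PySem.List.max? p.2 id).getD 0))
  rw [PySem.Dict.items_eq_map_keys dA hndA (0, 0),
      PySem.Dict.items_eq_map_keys dB hndB [], List.map_map, hkA, hkB]
  apply List.map_congr_left
  intro k hk
  have hkmem : k ∈ window.map (fun y => y.2.2.1) := by
    have : k ∈ PySem.Set.ofList (window.map (fun y => y.2.2.1)) := by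
      simpa [PySem.Set.ofList, PySem.Set.update, PySem.Set.empty] using hk
    exact (PySem.Set.mem_ofList _ _).mp this
  have hfilter : (window.filter (fun y => y.2.2.1 == k)) ≠ [] := by
    rcases List.mem_map.mp hkmem with ⟨y, hy, hyk⟩
    intro hnil
    have : y ∈ window.filter (fun y => y.2.2.1 == k) :=
      List.mem_filter.mpr ⟨hy, by simp [hyk]⟩
    simp [hnil] at this
  have hvne : ((window.filter (fun y => y.2.2.1 == k)).map (fun y => y.2.2.2)) ≠ [] := by
    simpa using hfilter
  have hA : dA.getD k (0, 0) =
      (((PySem.List.min? ((window.filter (fun y => y.2.2.1 == k)).map (fun y => y.2.2.2)) id).getD 0),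
       ((PySem.List.max? ((window.filter (fun y => y.2.2.1 == k)).map (fun y => y.2.2.2)) id).getD 0)) := by
    rw [PySem.Dict.getD_eq_get?_getD, hdA, lemA, PySem.Dict.get?_empty,
      pvMM_min_max _ hvne]
    rfl
  simp only [Function.comp]
  rw [hA, lemB]
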